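-- pv_equiv track=rewrite | github.com/TIS-JOEY/tmp | Untitled1 (1).py | generatekeyboardAdjencyMatrix
-- ===== SOURCE A (Python) =====
-- def generatekeyboardAdjencyMatrix(n):
--     import math
--     adjency_matrix = [[0]*n for i in range(n)]
--     col = int(math.sqrt(n))
--
--     for i in range(n):
--         baseAxis = (i//col, i%col)
--         for j in range(n):
--             travelAxis = (j//col, j%col)
--             diff = (abs(baseAxis[0]-travelAxis[0]), abs(baseAxis[1]-travelAxis[1]))
--             adjency_matrix[i][j] = max(diff)
--     return adjency_matrix
-- ===== SOURCE B (Python) =====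
-- def generatekeyboardAdjencyMatrix(n):
--     import math
--     col = int(math.sqrt(n))
--     # staged passes: precompute coordinates once, build the row-difference and
--     # column-difference tables as pure comprehensions, then combine them cell-wise.
--     coords = [divmod(k, col) for k in range(n)]
--     rowdiff = [[abs(r1 - r2) for (r2, _) in coords] for (r1, _) in coords]
--     coldiff = [[abs(c1 - c2) for (_, c2) in coords] for (_, c1) in coords]
--     return [[max(a, b) for a, b in zip(ra, ca)] for ra, ca in zip(rowdiff, coldiff)]
-- ===== Notes on version B (the rewrite author's own statement) =====
-- stated objective: alternative
-- what changed: B replaces A's single in-place double loop (allocate a zero matrix, then mutate each cell with the inline max of two abs-differences) by a mutation-free staged-pass pipeline: precompute the coordinate list once with divmod, build the full row-difference table and the full column-difference table as separate pure comprehensions, and combine the two tables cell-wise with a final zip/max pass.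
import Mathlib
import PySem

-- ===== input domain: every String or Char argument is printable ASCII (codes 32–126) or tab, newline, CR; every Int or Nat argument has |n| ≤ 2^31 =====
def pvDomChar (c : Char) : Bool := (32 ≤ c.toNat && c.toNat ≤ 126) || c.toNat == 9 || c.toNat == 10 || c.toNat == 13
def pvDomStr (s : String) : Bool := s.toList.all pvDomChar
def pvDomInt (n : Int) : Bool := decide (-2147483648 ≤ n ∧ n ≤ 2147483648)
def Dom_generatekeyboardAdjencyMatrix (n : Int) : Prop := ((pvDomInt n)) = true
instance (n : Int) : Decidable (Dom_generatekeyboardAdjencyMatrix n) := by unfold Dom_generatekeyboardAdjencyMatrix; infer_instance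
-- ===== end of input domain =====

-- B replaces A's in-place double loop by a mutation-free staged pipeline: a coordinate
-- list built once, two pure difference tables, and a final cell-wise max pass
-- (objective: alternative decomposition of the same O(n^2) task).

-- ===== PORT A =====
-- `int(math.sqrt(n))`: on the domain (0 ≤ n ≤ 2^31) the float sqrt truncated to int equals the
-- integer square root, so it is ported exactly as Nat.sqrt of n.toNat.
def generatekeyboardAdjencyMatrix (n : Int) : List (List Int) :=
  -- adjency_matrix = [[0]*n for i in range(n)]
  let adj0 : List (List Int) := (List.range n.toNat).map (fun _ => List.replicate n.toNat (0 : Int))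
  -- col = int(math.sqrt(n))
  let col : Int := ((Nat.sqrt n.toNat : Nat) : Int)
  (PySem.List.pyRange 0 n 1).foldl (fun m i =>
    let baseAxis : Int × Int := (PySem.Int.floordiv i col, PySem.Int.mod i col)
    (PySem.List.pyRange 0 n 1).foldl (fun m j =>
      let travelAxis : Int × Int := (PySem.Int.floordiv j col, PySem.Int.mod j col)
      let diff : Int × Int := (|baseAxis.1 - travelAxis.1|, |baseAxis.2 - travelAxis.2|)
      m.modify i.toNat (fun row => row.set j.toNat (max diff.1 diff.2))) m) adj0

-- ===== PORT B =====
-- `divmod(k, col)` is ported as the (floordiv, mod) pair; on every nonempty range col ≥ 1,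
-- so this is exact wherever Python evaluates it.
def generatekeyboardAdjencyMatrix_alt (n : Int) : List (List Int) :=
  let col : Int := ((Nat.sqrt n.toNat : Nat) : Int)
  -- coords = [divmod(k, col) for k in range(n)]
  let coords : List (Int × Int) :=
    (PySem.List.pyRange 0 n 1).map (fun k => (PySem.Int.floordiv k col, PySem.Int.mod k col))
  -- rowdiff / coldiff tables
  let rowdiff : List (List Int) := coords.map (fun a => coords.map (fun b => |a.1 - b.1|))
  let coldiff : List (List Int) := coords.map (fun a => coords.map (fun b => |a.2 - b.2|))
  -- [[max(a, b) for a, b in zip(ra, ca)] for ra, ca in zip(rowdiff, coldiff)]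
  List.zipWith (fun ra ca => List.zipWith (fun x y => max x y) ra ca) rowdiff coldiff

-- ===== PRECONDITION & SPEC =====
-- Pre_ excludes exactly n < 0, where `math.sqrt(n)` raises ValueError in A (and in B).
def Pre_generatekeyboardAdjencyMatrix (n : Int) : Prop := 0 ≤ n
instance (n : Int) : Decidable (Pre_generatekeyboardAdjencyMatrix n) := by unfold Pre_generatekeyboardAdjencyMatrix; infer_instance
def pvWitness_generatekeyboardAdjencyMatrix : Int := 5

def Spec_generatekeyboardAdjencyMatrix (n : Int) (out : List (List Int)) : Prop := out = generatekeyboardAdjencyMatrix_alt n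
instance (n : Int) (out : List (List Int)) : Decidable (Spec_generatekeyboardAdjencyMatrix n out) := by unfold Spec_generatekeyboardAdjencyMatrix; infer_instance

-- ===== CLAIM (what is proved, stated in full; the proofs are below) =====
def Claim_equal_generatekeyboardAdjencyMatrix : Prop := ∀ (n : Int), Dom_generatekeyboardAdjencyMatrix n → Pre_generatekeyboardAdjencyMatrix n → Spec_generatekeyboardAdjencyMatrix n (generatekeyboardAdjencyMatrix n)

-- ===== LEMMAS AND PROOFS =====

-- the Chebyshev distance between flat indices p and q on the col-wide grid
def pvF (col : Int) (p q : Nat) : Int :=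
  max |PySem.Int.floordiv (p : Int) col - PySem.Int.floordiv (q : Int) col|
      |PySem.Int.mod (p : Int) col - PySem.Int.mod (q : Int) col|

-- m[p][q] = v (Python's matrix cell assignment)
def pvUpd (m : List (List Int)) (p q : Nat) (v : Int) : List (List Int) :=
  m.modify p (fun row => row.set q v)

def pvGet2 (m : List (List Int)) (p q : Nat) : Option Int := m[p]?.bind (fun r => r[q]?)

def pvShaped (N : Nat) (m : List (List Int)) : Prop :=
  m.length = N ∧ ∀ (p : Nat) (r : List Int), m[p]? = some r → r.length = N

def pvInit (N : Nat) : List (List Int) := (List.range N).map (fun _ => List.replicate N (0 : Int))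

def pvTarget (col : Int) (N : Nat) : List (List Int) :=
  (List.range N).map (fun p => (List.range N).map (fun q => pvF col p q))

lemma pvShaped_upd {N : Nat} {m : List (List Int)} (h : pvShaped N m) (p q : Nat) (v : Int) :
    pvShaped N (pvUpd m p q v) := by
  obtain ⟨h1, h2⟩ := h
  refine ⟨by simpa [pvUpd] using h1, ?_⟩
  intro p' r hr
  rw [pvUpd, List.getElem?_modify] at hr
  cases hm : m[p']? with
  | none => simp [hm] at hr
  | some r0 =>
    rw [hm] at hr
    simp only [Option.map_eq_map, Option.map_some] at hr
    have hr' := Option.some.inj hr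
    split_ifs at hr' with hpp
    · subst hr'; simpa using h2 p' r0 hm
    · subst hr'; exact h2 p' r0 hm

lemma pvGet2_upd {N : Nat} {m : List (List Int)} (h : pvShaped N m) {p q : Nat}
    (hp : p < N) (hq : q < N) (v : Int) (p' q' : Nat) :
    pvGet2 (pvUpd m p q v) p' q' = if p' = p ∧ q' = q then some v else pvGet2 m p' q' := by
  obtain ⟨h1, h2⟩ := h
  have hp' : p < m.length := by omega
  have hr : m[p]? = some m[p] := List.getElem?_eq_getElem hp'
  have hrlen : (m[p]).length = N := h2 p _ hr
  rw [pvGet2, pvUpd, List.getElem?_modify]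
  by_cases hpp : p' = p
  · subst hpp
    rw [hr]
    by_cases hqq : q' = q
    · subst hqq
      simp [List.getElem?_set_self (show q' < (m[p']).length by omega)]
    · simp [List.getElem?_set_ne (show q ≠ q' from fun h => hqq h.symm), hqq, pvGet2, hr]
  · have hne : p ≠ p' := fun h => hpp h.symm
    simp [hne, hpp, pvGet2]

lemma pvMatrix_ext {N : Nat} {m m' : List (List Int)} (h1 : pvShaped N m) (h2 : pvShaped N m')
    (h : ∀ p q, p < N → q < N → pvGet2 m p q = pvGet2 m' p q) : m = m' := by
  have hl : m.length = N := h1.1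
  have hl' : m'.length = N := h2.1
  apply List.ext_getElem?
  intro p
  by_cases hp : p < N
  · have hpa : p < m.length := by omega
    have hpb : p < m'.length := by omega
    have hr : m[p]? = some m[p] := List.getElem?_eq_getElem hpa
    have hr' : m'[p]? = some m'[p] := List.getElem?_eq_getElem hpb
    have hrl : (m[p]).length = N := h1.2 p _ hr
    have hrl' : (m'[p]).length = N := h2.2 p _ hr'
    rw [hr, hr']
    congr 1
    apply List.ext_getElem?
    intro q
    by_cases hq : q < N
    · have := h p q hp hq
      rw [pvGet2, pvGet2, hr, hr'] at this
      simpa using this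
    · rw [List.getElem?_eq_none (by omega), List.getElem?_eq_none (by omega)]
  · rw [List.getElem?_eq_none (by omega), List.getElem?_eq_none (by omega)]

lemma pvShaped_init (N : Nat) : pvShaped N (pvInit N) := by
  refine ⟨by simp [pvInit], ?_⟩
  intro p r hr
  rw [pvInit, List.getElem?_map] at hr
  cases hm : (List.range N)[p]? with
  | none => rw [hm] at hr; simp at hr
  | some k => rw [hm] at hr; simp at hr; subst hr; simp

lemma pvGet2_init {N p q : Nat} (hp : p < N) (hq : q < N) : pvGet2 (pvInit N) p q = some 0 := by
  rw [pvGet2, pvInit, List.getElem?_map, List.getElem?_range hp]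
  simp [hq]

lemma pvShaped_target (col : Int) (N : Nat) : pvShaped N (pvTarget col N) := by
  refine ⟨by simp [pvTarget], ?_⟩
  intro p r hr
  rw [pvTarget, List.getElem?_map] at hr
  cases hm : (List.range N)[p]? with
  | none => rw [hm] at hr; simp at hr
  | some k => rw [hm] at hr; simp at hr; subst hr; simp

lemma pvGet2_target (col : Int) {N p q : Nat} (hp : p < N) (hq : q < N) :
    pvGet2 (pvTarget col N) p q = some (pvF col p q) := by
  rw [pvGet2, pvTarget, List.getElem?_map, List.getElem?_range hp]
  simp [List.getElem?_map, List.getElem?_range hq]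

-- inner loop of A: row i is filled with pvF col i · on its first c cells
lemma pvInnerA (col : Int) (N i : Nat) (hi : i < N) :
    ∀ c, c ≤ N → ∀ m, pvShaped N m →
      pvShaped N ((List.range c).foldl (fun m j => pvUpd m i j (pvF col i j)) m) ∧
      ∀ p q, p < N → q < N →
        pvGet2 ((List.range c).foldl (fun m j => pvUpd m i j (pvF col i j)) m) p q
          = if p = i ∧ q < c then some (pvF col i q) else pvGet2 m p q := by
  intro c
  induction c with
  | zero =>
    intro _ m hm
    refine ⟨by simpa using hm, ?_⟩
    intro p q _ _
    simp
  | succ c ih =>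
    intro hc m hm
    obtain ⟨ihS, ihG⟩ := ih (by omega) m hm
    rw [List.range_succ, List.foldl_append, List.foldl_cons, List.foldl_nil]
    refine ⟨pvShaped_upd ihS _ _ _, ?_⟩
    intro p q hp hq
    rw [pvGet2_upd ihS hi (by omega : c < N) _ p q, ihG p q hp hq]
    by_cases h1 : p = i ∧ q = c
    · obtain ⟨rfl, rfl⟩ := h1
      rw [if_pos ⟨rfl, rfl⟩, if_pos ⟨rfl, by omega⟩]
    · rw [if_neg h1]
      by_cases h2 : p = i ∧ q < c
      · rw [if_pos h2, if_pos ⟨h2.1, by omega⟩]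
      · rw [if_neg h2, if_neg ?_]
        rintro ⟨rfl, hb⟩
        have : q ≠ c := fun hc' => h1 ⟨rfl, hc'⟩
        exact h2 ⟨rfl, by omega⟩

-- outer loop of A: after k rows, the first k rows carry the distances, the rest are still 0
lemma pvOuterA (col : Int) (N : Nat) :
    ∀ k, k ≤ N →
      pvShaped N ((List.range k).foldl
        (fun m i => (List.range N).foldl (fun m j => pvUpd m i j (pvF col i j)) m) (pvInit N)) ∧
      ∀ p q, p < N → q < N →
        pvGet2 ((List.range k).foldl
          (fun m i => (List.range N).foldl (fun m j => pvUpd m i j (pvF col i j)) m) (pvInit N)) p q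
          = some (if p < k then pvF col p q else 0) := by
  intro k
  induction k with
  | zero =>
    intro _
    exact ⟨pvShaped_init N, fun p q hp hq => by simpa using pvGet2_init hp hq⟩
  | succ k ih =>
    intro hk
    obtain ⟨ihS, ihG⟩ := ih (by omega)
    rw [List.range_succ, List.foldl_append, List.foldl_cons, List.foldl_nil]
    obtain ⟨hS, hG⟩ := pvInnerA col N k (by omega) N le_rfl _ ihS
    refine ⟨hS, ?_⟩
    intro p q hp hq
    rw [hG p q hp hq, ihG p q hp hq]
    by_cases h1 : p = k
    · subst h1
      rw [if_pos ⟨rfl, hq⟩, if_pos (by omega)]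
    · rw [if_neg (fun h => h1 h.1)]
      by_cases h2 : p < k
      · rw [if_pos h2, if_pos (by omega)]
      · rw [if_neg h2, if_neg (by omega)]

-- zipWith of two maps over the same list collapses to a single map
lemma pvZipWith_map_same {α β γ δ : Type} (f : β → γ → δ) (g : α → β) (h : α → γ) :
    ∀ l : List α, List.zipWith f (l.map g) (l.map h) = l.map (fun x => f (g x) (h x)) := by
  intro l
  induction l with
  | nil => rfl
  | cons x xs ih => simp [ih]

-- the port of A computes the natural Nat-indexed double fold
lemma pvA_eq (n : Int) (hn : 0 ≤ n) :
    generatekeyboardAdjencyMatrix n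
      = (List.range n.toNat).foldl
          (fun m i => (List.range n.toNat).foldl
            (fun m j => pvUpd m i j (pvF ((Nat.sqrt n.toNat : Nat) : Int) i j)) m)
          (pvInit n.toNat) := by
  have hcast : n = ((n.toNat : Nat) : Int) := (Int.toNat_of_nonneg hn).symm
  conv_lhs => rw [generatekeyboardAdjencyMatrix]
  rw [hcast]
  simp only [Int.toNat_natCast, PySem.List.pyRange_zero_natCast, List.foldl_map, pvUpd, pvF,
    pvInit]

-- the port of B computes the closed-form target matrix
lemma pvB_eq (n : Int) (hn : 0 ≤ n) :
    generatekeyboardAdjencyMatrix_alt n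
      = pvTarget ((Nat.sqrt n.toNat : Nat) : Int) n.toNat := by
  have hcast : n = ((n.toNat : Nat) : Int) := (Int.toNat_of_nonneg hn).symm
  conv_lhs => rw [generatekeyboardAdjencyMatrix_alt]
  rw [hcast]
  simp only [Int.toNat_natCast, PySem.List.pyRange_zero_natCast, List.map_map, Function.comp_def]
  rw [pvZipWith_map_same, pvTarget]
  apply List.map_congr_left
  intro p _
  rw [pvZipWith_map_same]
  apply List.map_congr_left
  intro q _
  rfl

-- ===== VERDICT (by name: the statement is the Claim_ definition above) =====
theorem generatekeyboardAdjencyMatrix_spec : Claim_equal_generatekeyboardAdjencyMatrix := by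
  intro n _ hpre
  rw [Spec_generatekeyboardAdjencyMatrix]
  set N := n.toNat with hN
  set col : Int := ((Nat.sqrt N : Nat) : Int) with hcol
  obtain ⟨hAS, hAG⟩ := pvOuterA col N N le_rfl
  rw [pvA_eq n hpre, pvB_eq n hpre]
  apply pvMatrix_ext hAS (pvShaped_target col N)
  intro p q hp hq
  rw [hAG p q hp hq, pvGet2_target col hp hq, if_pos hp]
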